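-- pv_equiv track=rewrite | github.com/Deskuma/dkmath | lean/dk_math/docs/dev/FLT-BAFCT-260401-v0/temp_scripts/unified_descent_obstruction.py | hensel_lift_phi_p
-- ===== SOURCE A (Python) =====
-- def hensel_lift_phi_p(omega_j_mod_q, p, q, N):
--     """Lift root ω^j of Φ_p(x) = x^{p-1}+...+1 from mod q to mod q^N."""
--     r = omega_j_mod_q
--     for k in range(1, N):
--         phi = sum(r**i for i in range(p))
--         phi_deriv = sum(i * r ** (i - 1) for i in range(1, p))
--         residue = (phi // q**k) % q
--         deriv_mod = phi_deriv % q
--         deriv_inv = pow(deriv_mod, q - 2, q)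
--         c = (-residue * deriv_inv) % q
--         r = r + c * q**k
--     return r
-- ===== SOURCE B (Python) =====
-- def hensel_lift_phi_p(omega_j_mod_q, p, q, N):
--     """Lift root of Phi_p from mod q to mod q^N, with all arithmetic reduced
--     mod q^(k+1) so operands stay O(k log q) digits instead of the full lifted root."""
--     if N <= 1:
--         return omega_j_mod_q
--     acc = 0          # sum of corrections c_k * q^k accumulated so far
--     qk = q           # q^k for the current k
--     for k in range(1, N):
--         M = qk * q                       # q^(k+1)
--         rb = (omega_j_mod_q + acc) % M   # current root reduced mod q^(k+1)
--         rq = rb % q                      # current root reduced mod q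
--         phi = 0
--         pw = 1 % M
--         for i in range(p):               # phi = sum r^i  (mod M)
--             phi = (phi + pw) % M
--             pw = pw * rb % M
--         dm = 0
--         pwq = 1 % q
--         for i in range(1, p):            # phi' = sum i*r^(i-1)  (mod q)
--             dm = (dm + i * pwq) % q
--             pwq = pwq * rq % q
--         residue = phi // qk % q
--         c = -residue * pow(dm, q - 2, q) % q
--         acc += c * qk
--         qk = M
--     return omega_j_mod_q + acc
-- ===== Notes on version B (the rewrite author's own statement) =====
-- stated objective: faster
-- what changed: B never forms the full lifted root or exact bignum power sums: it accumulates the corrections c_k*q^k separately and evaluates phi and phi' by incremental modular powers of the root reduced mod q^(k+1) (resp. mod q), so every operand stays about k*log(q) digits instead of the exact powers r^p of the O(N log q)-digit root.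
-- outside the precondition, e.g. on hensel_lift_phi_p(20, 5, -5, 3): A returns -5, B returns -5
import Mathlib
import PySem

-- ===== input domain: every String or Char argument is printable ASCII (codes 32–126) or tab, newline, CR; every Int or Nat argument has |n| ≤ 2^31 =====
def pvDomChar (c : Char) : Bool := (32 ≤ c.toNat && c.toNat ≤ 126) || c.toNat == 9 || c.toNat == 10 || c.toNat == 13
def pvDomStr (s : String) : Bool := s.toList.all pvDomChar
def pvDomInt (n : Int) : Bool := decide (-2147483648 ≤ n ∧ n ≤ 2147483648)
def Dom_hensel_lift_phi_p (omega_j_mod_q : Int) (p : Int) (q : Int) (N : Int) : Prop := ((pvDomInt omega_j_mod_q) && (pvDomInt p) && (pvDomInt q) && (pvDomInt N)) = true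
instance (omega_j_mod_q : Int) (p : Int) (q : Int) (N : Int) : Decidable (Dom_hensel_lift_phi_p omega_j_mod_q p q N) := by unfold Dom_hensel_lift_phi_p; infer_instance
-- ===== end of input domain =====

-- B lifts with all arithmetic reduced mod q^(k+1) (small operands) instead of A's exact
-- bignum power sums over the full lifted root; equivalence of the return values is proved on Pre_.

-- ===== PORT A =====
def pvAstep (p q : Int) (r : Int) (k : Int) : Int :=
  let phi := ((PySem.List.pyRange 0 p 1).map (fun i => r ^ i.toNat)).sum
  let phi_deriv := ((PySem.List.pyRange 1 p 1).map (fun i => i * r ^ (i - 1).toNat)).sum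
  let residue := PySem.Int.mod (PySem.Int.floordiv phi (q ^ k.toNat)) q
  let deriv_mod := PySem.Int.mod phi_deriv q
  let deriv_inv := PySem.Int.powMod deriv_mod (q - 2).toNat q
  let c := PySem.Int.mod (-residue * deriv_inv) q
  r + c * q ^ k.toNat

def hensel_lift_phi_p (omega_j_mod_q : Int) (p : Int) (q : Int) (N : Int) : Int :=
  (PySem.List.pyRange 1 N 1).foldl (pvAstep p q) omega_j_mod_q

-- ===== PORT B =====
def pvBphiStep (M rb : Int) (st : Int × Int) (_i : Int) : Int × Int :=
  (PySem.Int.mod (st.1 + st.2) M, PySem.Int.mod (st.2 * rb) M)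

def pvBderivStep (q rq : Int) (st : Int × Int) (i : Int) : Int × Int :=
  (PySem.Int.mod (st.1 + i * st.2) q, PySem.Int.mod (st.2 * rq) q)

def pvBstep (omega p q : Int) (st : Int × Int) (_k : Int) : Int × Int :=
  let acc := st.1
  let qk := st.2
  let M := qk * q
  let rb := PySem.Int.mod (omega + acc) M
  let rq := PySem.Int.mod rb q
  let phi := ((PySem.List.pyRange 0 p 1).foldl (pvBphiStep M rb) (0, PySem.Int.mod 1 M)).1
  let dm := ((PySem.List.pyRange 1 p 1).foldl (pvBderivStep q rq) (0, PySem.Int.mod 1 q)).1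
  let residue := PySem.Int.mod (PySem.Int.floordiv phi qk) q
  let c := PySem.Int.mod (-residue * PySem.Int.powMod dm (q - 2).toNat q) q
  (acc + c * qk, M)

def hensel_lift_phi_p_alt (omega_j_mod_q : Int) (p : Int) (q : Int) (N : Int) : Int :=
  if N ≤ 1 then omega_j_mod_q
  else omega_j_mod_q + ((PySem.List.pyRange 1 N 1).foldl (pvBstep omega_j_mod_q p q) (0, q)).1

-- ===== PRECONDITION & SPEC =====
-- Pre_ excludes q ≤ 0 with N ≥ 2: there A's pow(·, q-2, q) has a negative exponent, so A raises
-- (ZeroDivisionError for q = 0, ValueError when the derivative is not invertible mod q) or returns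
-- depending on run-time values — not a closed-form condition on the input.
def Pre_hensel_lift_phi_p (omega_j_mod_q : Int) (p : Int) (q : Int) (N : Int) : Prop :=
  1 ≤ q ∨ N ≤ 1
instance (omega_j_mod_q : Int) (p : Int) (q : Int) (N : Int) : Decidable (Pre_hensel_lift_phi_p omega_j_mod_q p q N) := by unfold Pre_hensel_lift_phi_p; infer_instance

def pvWitness_hensel_lift_phi_p : Int × Int × Int × Int := (3, 5, 7, 3)

def Spec_hensel_lift_phi_p (omega_j_mod_q : Int) (p : Int) (q : Int) (N : Int) (out : Int) : Prop := out = hensel_lift_phi_p_alt omega_j_mod_q p q N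
instance (omega_j_mod_q : Int) (p : Int) (q : Int) (N : Int) (out : Int) : Decidable (Spec_hensel_lift_phi_p omega_j_mod_q p q N out) := by unfold Spec_hensel_lift_phi_p; infer_instance

-- ===== CLAIM (what is proved, stated in full; the proofs are below) =====
def Claim_equal_hensel_lift_phi_p : Prop := ∀ (omega_j_mod_q : Int) (p : Int) (q : Int) (N : Int), Dom_hensel_lift_phi_p omega_j_mod_q p q N → Pre_hensel_lift_phi_p omega_j_mod_q p q N → Spec_hensel_lift_phi_p omega_j_mod_q p q N (hensel_lift_phi_p omega_j_mod_q p q N)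

-- ===== LEMMAS AND PROOFS =====

-- extracting the middle q-digit of x commutes with first reducing x mod A*q
lemma pv_digit_lemma (q A x : Int) (hA : 0 < A) :
    (x % (A * q)) / A % q = x / A % q := by
  conv_rhs => rw [← Int.ediv_add_emod x (A * q)]  -- x = (A*q)*(x/(A*q)) + x%(A*q)
  have h1 : A * q * (x / (A * q)) + x % (A * q) = x % (A * q) + A * (q * (x / (A * q))) := by ring
  rw [h1, Int.add_mul_ediv_left _ _ (ne_of_gt hA), Int.add_mul_emod_self_left]

-- the reduced phi loop computes (sum of r^i) mod M, and its state stays reduced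
lemma pv_phi_fold (M r rb : Int) (hM : 0 < M) (hrb : rb % M = r % M) :
    ∀ (t : Nat) (a pe : Int), 0 ≤ a → (pe - a).toNat = t →
    ∀ s pw : Int, s % M = s → pw % M = r ^ a.toNat % M →
    ((PySem.List.pyRange a pe 1).foldl (pvBphiStep M rb) (s, pw)).1 % M
        = ((PySem.List.pyRange a pe 1).foldl (pvBphiStep M rb) (s, pw)).1
    ∧ ((PySem.List.pyRange a pe 1).foldl (pvBphiStep M rb) (s, pw)).1 % M
        = (s + ((PySem.List.pyRange a pe 1).map (fun i => r ^ i.toNat)).sum) % M := by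
  intro t
  induction t with
  | zero =>
    intro a pe ha ht s pw hs hpw
    have hle : pe ≤ a := by omega
    rw [PySem.List.pyRange_one_eq_nil hle]
    simp [hs]
  | succ t ih =>
    intro a pe ha ht s pw hs hpw
    have hlt : a < pe := by omega
    rw [PySem.List.pyRange_one_cons hlt]
    simp only [List.foldl_cons, List.map_cons, List.sum_cons]
    have hstep : pvBphiStep M rb (s, pw) a = ((s + pw) % M, (pw * rb) % M) := by
      simp [pvBphiStep, PySem.Int.mod_eq_emod_of_pos hM]
    rw [hstep]
    have hs' : ((s + pw) % M) % M = (s + pw) % M := Int.emod_emod_of_dvd _ dvd_rfl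
    have hpw' : ((pw * rb) % M) % M = r ^ (a + 1).toNat % M := by
      rw [Int.emod_emod_of_dvd _ dvd_rfl, Int.mul_emod, hpw, hrb, ← Int.mul_emod]
      congr 1
      rw [show (a + 1).toNat = a.toNat + 1 by omega, pow_succ]
    obtain ⟨h1, h2⟩ := ih (a + 1) pe (by omega) (by omega) _ _ hs' hpw'
    refine ⟨h1, ?_⟩
    rw [h2]
    have hcong : ((s + pw) % M) % M = (s + r ^ a.toNat) % M := by
      rw [Int.emod_emod_of_dvd _ dvd_rfl, Int.add_emod, hpw, ← Int.add_emod]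
    conv_rhs => rw [← add_assoc]
    exact Int.ModEq.add_right _ hcong

-- the reduced derivative loop computes (sum of i*r^(i-1)) mod q, state stays reduced
lemma pv_deriv_fold (q r rq : Int) (hq : 0 < q) (hrq : rq % q = r % q) :
    ∀ (t : Nat) (a pe : Int), 1 ≤ a → (pe - a).toNat = t →
    ∀ s pw : Int, s % q = s → pw % q = r ^ (a - 1).toNat % q →
    ((PySem.List.pyRange a pe 1).foldl (pvBderivStep q rq) (s, pw)).1 % q
        = ((PySem.List.pyRange a pe 1).foldl (pvBderivStep q rq) (s, pw)).1
    ∧ ((PySem.List.pyRange a pe 1).foldl (pvBderivStep q rq) (s, pw)).1 % q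
        = (s + ((PySem.List.pyRange a pe 1).map (fun i => i * r ^ (i - 1).toNat)).sum) % q := by
  intro t
  induction t with
  | zero =>
    intro a pe ha ht s pw hs hpw
    have hle : pe ≤ a := by omega
    rw [PySem.List.pyRange_one_eq_nil hle]
    simp [hs]
  | succ t ih =>
    intro a pe ha ht s pw hs hpw
    have hlt : a < pe := by omega
    rw [PySem.List.pyRange_one_cons hlt]
    simp only [List.foldl_cons, List.map_cons, List.sum_cons]
    have hstep : pvBderivStep q rq (s, pw) a = ((s + a * pw) % q, (pw * rq) % q) := by
      simp [pvBderivStep, PySem.Int.mod_eq_emod_of_pos hq]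
    rw [hstep]
    have hs' : ((s + a * pw) % q) % q = (s + a * pw) % q := Int.emod_emod_of_dvd _ dvd_rfl
    have hpw' : ((pw * rq) % q) % q = r ^ ((a + 1) - 1).toNat % q := by
      rw [Int.emod_emod_of_dvd _ dvd_rfl, Int.mul_emod, hpw, hrq, ← Int.mul_emod]
      congr 1
      rw [show ((a + 1) - 1).toNat = (a - 1).toNat + 1 by omega, pow_succ]
    obtain ⟨h1, h2⟩ := ih (a + 1) pe (by omega) (by omega) _ _ hs' hpw'
    refine ⟨h1, ?_⟩
    rw [h2]
    have hcong : ((s + a * pw) % q) % q = (s + a * r ^ (a - 1).toNat) % q := by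
      rw [Int.emod_emod_of_dvd _ dvd_rfl, Int.add_emod, Int.mul_emod, hpw,
          ← Int.mul_emod, ← Int.add_emod]
    conv_rhs => rw [← add_assoc]
    exact Int.ModEq.add_right _ hcong

-- one loop iteration: A's update on the full root equals omega + B's update on the correction
lemma pv_step_eq (omega p q : Int) (hq : 1 ≤ q) (k : Int) (hk : 1 ≤ k) (acc : Int) :
    pvAstep p q (omega + acc) k = omega + (pvBstep omega p q (acc, q ^ k.toNat) k).1
    ∧ (pvBstep omega p q (acc, q ^ k.toNat) k).2 = q ^ (k + 1).toNat := by
  have hq0 : (0 : Int) < q := by omega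
  have hqk : (0 : Int) < q ^ k.toNat := pow_pos hq0 _
  have hM : (0 : Int) < q ^ k.toNat * q := mul_pos hqk hq0
  have hqdvd : q ∣ q ^ k.toNat * q := ⟨q ^ k.toNat, mul_comm _ _⟩
  have hpow : q ^ k.toNat * q = q ^ (k + 1).toNat := by
    rw [show (k + 1).toNat = k.toNat + 1 by omega, pow_succ]
  constructor
  · simp only [pvAstep, pvBstep]
    simp only [PySem.Int.mod_eq_emod_of_pos hM, PySem.Int.mod_eq_emod_of_pos hq0,
      PySem.Int.floordiv_eq_ediv_of_pos hqk]
    obtain ⟨h1, h2⟩ := pv_phi_fold (q ^ k.toNat * q) (omega + acc)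
      ((omega + acc) % (q ^ k.toNat * q)) hM (Int.emod_emod_of_dvd _ dvd_rfl)
      (p - 0).toNat 0 p le_rfl rfl 0 (1 % (q ^ k.toNat * q))
      (by simp)
      (by rw [Int.emod_emod_of_dvd 1 dvd_rfl]; norm_num)
    have hphiB := h1.symm.trans h2
    rw [zero_add] at hphiB
    obtain ⟨h3, h4⟩ := pv_deriv_fold q (omega + acc)
      (((omega + acc) % (q ^ k.toNat * q)) % q) hq0
      (by rw [Int.emod_emod_of_dvd _ dvd_rfl, Int.emod_emod_of_dvd _ hqdvd])
      (p - 1).toNat 1 p le_rfl rfl 0 (1 % q)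
      (by simp)
      (by rw [Int.emod_emod_of_dvd 1 dvd_rfl]; norm_num)
    have hdmB := h3.symm.trans h4
    rw [zero_add] at hdmB
    rw [hphiB, hdmB, pv_digit_lemma q (q ^ k.toNat) _ hqk]
    ring
  · simp only [pvBstep]
    exact hpow

-- the whole loop: A run from step m equals omega plus B run from step m
lemma pv_loop (omega p q N : Int) (hq : 1 ≤ q) :
    ∀ (t : Nat) (m : Int), 1 ≤ m → (N - m).toNat = t → ∀ acc : Int,
    (PySem.List.pyRange m N 1).foldl (pvAstep p q) (omega + acc)
      = omega + ((PySem.List.pyRange m N 1).foldl (pvBstep omega p q) (acc, q ^ m.toNat)).1 := by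
  intro t
  induction t with
  | zero =>
    intro m hm ht acc
    rw [PySem.List.pyRange_one_eq_nil (by omega)]
    simp
  | succ t ih =>
    intro m hm ht acc
    rw [PySem.List.pyRange_one_cons (by omega)]
    simp only [List.foldl_cons]
    obtain ⟨hA, hB2⟩ := pv_step_eq omega p q hq m hm acc
    rw [hA]
    have hst : pvBstep omega p q (acc, q ^ m.toNat) m
        = ((pvBstep omega p q (acc, q ^ m.toNat) m).1, q ^ (m + 1).toNat) := by
      rw [← hB2]
    rw [hst]
    exact ih (m + 1) (by omega) (by omega) _

-- ===== VERDICT (by name: the statement is the Claim_ definition above) =====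
theorem hensel_lift_phi_p_spec : Claim_equal_hensel_lift_phi_p := by
  intro omega p q N _hdom hpre
  unfold Spec_hensel_lift_phi_p hensel_lift_phi_p hensel_lift_phi_p_alt
  by_cases hN : N ≤ 1
  · rw [if_pos hN, PySem.List.pyRange_one_eq_nil hN]
    simp
  · rw [if_neg hN]
    have hq : 1 ≤ q := hpre.resolve_right hN
    have h := pv_loop omega p q N hq (N - 1).toNat 1 le_rfl rfl 0
    simpa using h
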